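-- pv_equiv track=rewrite | github.com/CodeupClassroom/somerville-python | function_exercises.py | cap_first
-- ===== SOURCE A (Python) =====
-- def is_vowel(input):
--     if input in ('aeiou'):
--         return True
--     else:
--         return False
--
-- def is_consonant(input):
--     if is_vowel(input):
--         return False
--     else:
--         return True
--
-- def cap_first(input):
--     count = 0
--     new_string = ''
--     for letter in input:
--         #take the first letter and capitalize if consonant
--         if count == 0 and is_consonant(letter):
--             new_string +=letter.upper()
--             count =+1
--         else:
--             new_string += letter
--             count += 1
--     return new_string
-- ===== SOURCE B (Python) =====
-- def cap_first(input):
--     if input and input[0] not in 'aeiou':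
--         return input[0].upper() + input[1:]
--     return input
-- ===== Notes on version B (the rewrite author's own statement) =====
-- stated objective: simpler
-- what changed: Replaces the character-by-character loop with its count flag and the is_vowel/is_consonant helpers by a single first-character vowel test plus slice: uppercase the first char if it is a non-vowel, otherwise return the string unchanged.
import Mathlib
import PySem

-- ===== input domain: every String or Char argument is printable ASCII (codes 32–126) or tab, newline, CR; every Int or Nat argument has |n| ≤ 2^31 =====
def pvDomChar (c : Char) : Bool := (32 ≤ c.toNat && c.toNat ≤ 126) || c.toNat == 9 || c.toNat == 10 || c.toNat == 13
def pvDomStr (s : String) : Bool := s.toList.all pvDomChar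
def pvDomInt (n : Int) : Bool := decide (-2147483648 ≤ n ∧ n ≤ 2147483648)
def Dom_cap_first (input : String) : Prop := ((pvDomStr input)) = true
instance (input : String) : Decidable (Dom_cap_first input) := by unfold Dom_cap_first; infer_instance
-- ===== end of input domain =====

-- B replaces A's per-character loop (count flag + vowel/consonant helpers) by a first-char test and slice; objective: simpler.

-- ===== PORT A =====
-- Python: `input in 'aeiou'` (substring test); for the single chars the loop feeds it, this is membership
def is_vowel (c : Char) : Bool :=
  if "aeiou".toList.contains c then true else false

def is_consonant (c : Char) : Bool :=
  if is_vowel c then false else true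

-- the for-loop over (count, new_string); `count =+ 1` in Python assigns count := 1
def capLoop : Int → List Char → List Char → List Char
  | _, acc, [] => acc
  | count, acc, c :: rest =>
    if count == 0 && is_consonant c then
      capLoop 1 (acc ++ [PySem.Chars.upperChar c]) rest
    else
      capLoop (count + 1) (acc ++ [c]) rest

def cap_first (input : String) : String := String.ofList (capLoop 0 [] input.toList)

-- ===== PORT B =====
def cap_first_alt (input : String) : String :=
  match input.toList with
  | [] => input
  | c :: rest =>
    if "aeiou".toList.contains c then input
    else String.ofList (PySem.Chars.upperChar c :: rest)

-- ===== PRECONDITION & SPEC =====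
def Spec_cap_first (input : String) (out : String) : Prop := out = cap_first_alt input
instance (input : String) (out : String) : Decidable (Spec_cap_first input out) := by unfold Spec_cap_first; infer_instance

-- ===== CLAIM (what is proved, stated in full; the proofs are below) =====
def Claim_equal_cap_first : Prop := ∀ (input : String), Dom_cap_first input → Spec_cap_first input (cap_first input)

-- ===== LEMMAS AND PROOFS =====

-- once count > 0 the loop only appends the remaining characters unchanged
theorem capLoop_pos (rest : List Char) : ∀ (acc : List Char) (count : Int), 0 < count →
    capLoop count acc rest = acc ++ rest := by
  induction rest with
  | nil => intro acc count _; simp [capLoop]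
  | cons c cs ih =>
    intro acc count hc
    have h0 : (count == 0) = false := by simp; omega
    simp [capLoop, h0, ih (acc ++ [c]) (count + 1) (by omega)]

-- ===== VERDICT (by name: the statement is the Claim_ definition above) =====
theorem cap_first_spec : Claim_equal_cap_first := by
  intro input _
  unfold Spec_cap_first cap_first cap_first_alt
  cases h : input.toList with
  | nil => simp [capLoop, ← h]
  | cons c rest =>
    simp [capLoop, is_consonant, is_vowel, capLoop_pos rest [c] 1 (by omega),
      capLoop_pos rest [PySem.Chars.upperChar c] 1 (by omega)]
    split_ifs with h1 h2
    · exact absurd h2 (by tauto)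
    · rfl
    · rw [← h]; simp
    · exact absurd h1 (by tauto)
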